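-- pv_equiv track=rewrite | github.com/luispedro/rbit | rbit/imap.py | breakup
-- ===== SOURCE A (Python) =====
-- def breakup(seq, n):
--     if not (n > 0):
--         raise ValueError("breakup: n must be greater than zero (got {0}).".format(n))
--     cur = []
--     for s in seq:
--         if len(cur) == n:
--             yield cur
--             cur = []
--         cur.append(s)
--     if len(cur):
--         yield cur
-- ===== SOURCE B (Python) =====
-- def breakup(seq, n):
--     if not (n > 0):
--         raise ValueError("breakup: n must be greater than zero (got {0}).".format(n))
--     seq = list(seq)
--     while seq:
--         chunk, seq = seq[:n], seq[n:]
--         yield chunk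
-- ===== Notes on version B (the rewrite author's own statement) =====
-- stated objective: simpler
-- what changed: Replaces the per-element accumulator with a length-n check and trailing flush by a while loop that slices off the next n-element chunk at a time.
import Mathlib
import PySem

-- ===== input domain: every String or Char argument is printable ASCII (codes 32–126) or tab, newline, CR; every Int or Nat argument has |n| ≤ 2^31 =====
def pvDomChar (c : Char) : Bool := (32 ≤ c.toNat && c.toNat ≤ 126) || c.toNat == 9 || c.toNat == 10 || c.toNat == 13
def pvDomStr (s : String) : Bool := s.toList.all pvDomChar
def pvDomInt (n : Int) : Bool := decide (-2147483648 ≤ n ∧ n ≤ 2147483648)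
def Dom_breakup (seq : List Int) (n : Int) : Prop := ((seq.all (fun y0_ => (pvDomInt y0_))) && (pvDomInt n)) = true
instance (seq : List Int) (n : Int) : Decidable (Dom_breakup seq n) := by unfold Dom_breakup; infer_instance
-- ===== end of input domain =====

-- B replaces A's per-element accumulator (append, length-n check, trailing flush)
-- by a while loop slicing off the next n-element chunk at a time; same output, same cost.


-- ===== PORT A =====
-- A's for-loop as structural recursion over seq carrying the accumulator `cur`;
-- each `yield` conses the yielded chunk onto the result list.
def breakupGo (n : Int) : List Int → List Int → List (List Int)
  | [], cur => if cur.length ≠ 0 then [cur] else []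
  | s :: rest, cur =>
    if (cur.length : Int) = n then cur :: breakupGo n rest [s]
    else breakupGo n rest (cur ++ [s])

def breakup (seq : List Int) (n : Int) : List (List Int) :=
  if ¬ (n > 0) then []        -- Python raises ValueError here; excluded by Pre_breakup
  else breakupGo n seq []

-- ===== PORT B =====
-- B's while loop: while seq: yield seq[:n]; seq = seq[n:].  The chunk size is
-- (m+1) with m = n-1 so the recursion is structurally decreasing; for n ≥ 1 the
-- slices seq[:n] / seq[n:] are exactly List.take / List.drop.
def breakupAltGo (m : Nat) : List Int → List (List Int)
  | [] => []
  | s :: rest => (s :: rest.take m) :: breakupAltGo m (rest.drop m)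
  termination_by seq => seq.length
  decreasing_by
    simp only [List.length_cons, List.length_drop]
    omega

def breakup_alt (seq : List Int) (n : Int) : List (List Int) :=
  if ¬ (n > 0) then []        -- Python raises ValueError here; excluded by Pre_breakup
  else breakupAltGo (n.toNat - 1) seq

-- ===== PRECONDITION & SPEC =====
-- Pre_ excludes exactly n ≤ 0, on which the Python breakup raises ValueError.
def Pre_breakup (seq : List Int) (n : Int) : Prop := 0 < n
instance (seq : List Int) (n : Int) : Decidable (Pre_breakup seq n) := by unfold Pre_breakup; infer_instance
def pvWitness_breakup : List Int × Int := ([1, 2, 3, 4, 5], 2)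

def Spec_breakup (seq : List Int) (n : Int) (out : List (List Int)) : Prop := out = breakup_alt seq n
instance (seq : List Int) (n : Int) (out : List (List Int)) : Decidable (Spec_breakup seq n out) := by unfold Spec_breakup; infer_instance

-- ===== CLAIM (what is proved, stated in full; the proofs are below) =====
def Claim_equal_breakup : Prop := ∀ (seq : List Int) (n : Int), Dom_breakup seq n → Pre_breakup seq n → Spec_breakup seq n (breakup seq n)

-- ===== LEMMAS AND PROOFS =====

-- Loop invariant: with a nonempty accumulator of length ≤ n, A's loop produces
-- exactly B's chunking of (cur ++ seq).
theorem breakupGo_eq_altGo (n : Int) (m : Nat) (hn : n = (m : Int) + 1) :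
    ∀ (seq cur : List Int), cur ≠ [] → cur.length ≤ m + 1 →
      breakupGo n seq cur = breakupAltGo m (cur ++ seq) := by
  intro seq
  induction seq with
  | nil =>
    intro cur hne hle
    obtain ⟨c, cs, rfl⟩ := List.exists_cons_of_ne_nil hne
    have hcs : cs.length ≤ m := by simpa using hle
    simp [breakupGo, breakupAltGo, List.take_of_length_le hcs,
      List.drop_of_length_le hcs]
  | cons s rest ih =>
    intro cur hne hle
    obtain ⟨c, cs, rfl⟩ := List.exists_cons_of_ne_nil hne
    by_cases hfull : ((c :: cs).length : Int) = n
    · have hcs : cs.length = m := by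
        have := hfull; simp [hn] at this; omega
      rw [breakupGo, if_pos hfull]
      have hrec := ih [s] (by simp) (by simp)
      rw [hrec]
      have h1 : (cs ++ s :: rest).take m = cs := by
        rw [← hcs]; exact List.take_left
      have h2 : (cs ++ s :: rest).drop m = s :: rest := by
        rw [← hcs]; exact List.drop_left
      simp [breakupAltGo, h1, h2]
    · have hlt : (c :: cs).length ≤ m := by
        have h1 : ((c :: cs).length : Int) ≤ n := by exact_mod_cast (by simpa [hn] using hle)
        have h2 : ((c :: cs).length : Int) < n := lt_of_le_of_ne h1 hfull
        omega
      rw [breakupGo, if_neg hfull]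
      have hrec := ih (c :: cs ++ [s]) (by simp) (by simp only [List.length_cons] at hlt ⊢; simp; omega)
      rw [hrec]
      simp

theorem breakup_spec_aux (seq : List Int) (n : Int) (hn : 0 < n) :
    breakup seq n = breakup_alt seq n := by
  have hgt : n > 0 := hn
  set m := n.toNat - 1 with hm
  have hn' : n = (m : Int) + 1 := by omega
  unfold breakup breakup_alt
  rw [if_neg (by omega), if_neg (by omega)]
  cases seq with
  | nil => simp [breakupGo, breakupAltGo]
  | cons s rest =>
    rw [breakupGo, if_neg (by simp; omega)]
    have := breakupGo_eq_altGo n m hn' rest [s] (by simp) (by simp)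
    simpa using this

-- ===== VERDICT (by name: the statement is the Claim_ definition above) =====
theorem breakup_spec : Claim_equal_breakup := by
  intro seq n _ hpre
  exact breakup_spec_aux seq n hpre
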